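-- pv_equiv track=rewrite | github.com/stephenmuller/Trap-Scoring | trap_scorekeeping/logic.py | find_streaks_in_rounds
-- ===== SOURCE A (Python) =====
-- def find_streaks_in_rounds(all_rounds_as_giant_boolean_list):
--     """outputs all streaks in a given list of booleans
--
--     >>> a = [False, False, False, True, True, True, True, True, True, True, True, True, True, True, True, True, True,
--     ... True, True, True, True, True, True, True, True, True, True, True, True, True, True, True, True, True, True,
--     ... True, True, True, True, True, True, True, True, True, True, True, True, True, True, False]
--     >>> find_streaks_in_rounds(a)
--     [0, 0, 46]
--
--     >>> b = [False, False, False, True, True, True, True, True, True, True, True, True, True, True, True, True, True,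
--     ... True, True, True, True, False, True, True, True, False, True, True, True, True, True, True, True, True, True,
--     ... True, True, True, True, True, True, True, True, True, True, True, True, True, True, False]
--     >>> find_streaks_in_rounds(b)
--     [0, 0, 18, 3, 23]
--     """
--     false_indexes = [
--         i
--         for i, x in enumerate(all_rounds_as_giant_boolean_list)
--         if x == False
--     ]
--     streaks = [
--         i2 - i1 - 1
--         for i1, i2 in zip(false_indexes, false_indexes[1:])
--     ]
--     return streaks
-- ===== SOURCE B (Python) =====
-- def find_streaks_in_rounds(all_rounds_as_giant_boolean_list):
--     """Streaming single pass: count non-False elements since the previous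
--     False; each time a further False arrives, emit the count."""
--     streaks = []
--     seen_false = False
--     count = 0
--     for x in all_rounds_as_giant_boolean_list:
--         if x == False:
--             if seen_false:
--                 streaks.append(count)
--             seen_false = True
--             count = 0
--         else:
--             count += 1
--     return streaks
-- ===== Notes on version B (the rewrite author's own statement) =====
-- stated objective: simpler
-- what changed: Replaces the three-pass pipeline (enumerate+filter to collect False indexes, slice, zip of adjacent pairs with index subtraction) by one streaming pass that keeps a counter of elements since the last False and emits it at each subsequent False, never materialising the index list.
import Mathlib
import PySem

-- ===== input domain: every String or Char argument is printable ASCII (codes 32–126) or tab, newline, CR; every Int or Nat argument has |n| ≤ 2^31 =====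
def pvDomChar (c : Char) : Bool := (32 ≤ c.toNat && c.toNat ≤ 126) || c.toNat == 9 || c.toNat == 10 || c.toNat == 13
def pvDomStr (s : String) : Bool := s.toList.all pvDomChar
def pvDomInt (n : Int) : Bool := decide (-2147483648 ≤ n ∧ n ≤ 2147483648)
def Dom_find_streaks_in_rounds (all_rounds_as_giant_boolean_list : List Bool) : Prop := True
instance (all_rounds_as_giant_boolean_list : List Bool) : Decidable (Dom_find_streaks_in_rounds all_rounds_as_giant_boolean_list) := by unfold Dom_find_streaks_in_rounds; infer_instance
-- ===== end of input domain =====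

-- B replaces A's three-pass pipeline (collect False indexes, zip adjacent pairs, subtract)
-- by one streaming pass keeping a count of elements since the last False (objective: simpler).

-- ===== PORT A =====
-- false_indexes = [i for i, x in enumerate(lst) if x == False]
-- streaks = [i2 - i1 - 1 for i1, i2 in zip(false_indexes, false_indexes[1:])]
def find_streaks_in_rounds (all_rounds_as_giant_boolean_list : List Bool) : List Int :=
  let false_indexes : List Int :=
    ((all_rounds_as_giant_boolean_list.zipIdx.filter (fun p => p.1 == false)).map
      (fun p => (p.2 : Int)))
  ((false_indexes.zip false_indexes.tail).map (fun p => p.2 - p.1 - 1))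

-- ===== PORT B =====
-- one fold over the list with state (seen_false, count, streaks)
def bStep (st : Bool × Int × List Int) (x : Bool) : Bool × Int × List Int :=
  if x == false then
    (true, 0, if st.1 then st.2.2 ++ [st.2.1] else st.2.2)
  else
    (st.1, st.2.1 + 1, st.2.2)

def find_streaks_in_rounds_alt (all_rounds_as_giant_boolean_list : List Bool) : List Int :=
  (all_rounds_as_giant_boolean_list.foldl bStep (false, 0, [])).2.2

-- ===== PRECONDITION & SPEC =====
def Spec_find_streaks_in_rounds (all_rounds_as_giant_boolean_list : List Bool) (out : List Int) : Prop := out = find_streaks_in_rounds_alt all_rounds_as_giant_boolean_list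
instance (all_rounds_as_giant_boolean_list : List Bool) (out : List Int) : Decidable (Spec_find_streaks_in_rounds all_rounds_as_giant_boolean_list out) := by unfold Spec_find_streaks_in_rounds; infer_instance

-- ===== CLAIM (what is proved, stated in full; the proofs are below) =====
def Claim_equal_find_streaks_in_rounds : Prop := ∀ (all_rounds_as_giant_boolean_list : List Bool), Dom_find_streaks_in_rounds all_rounds_as_giant_boolean_list → Spec_find_streaks_in_rounds all_rounds_as_giant_boolean_list (find_streaks_in_rounds all_rounds_as_giant_boolean_list)

-- ===== LEMMAS AND PROOFS =====

-- the gaps emitted after the first False, starting with c elements already counted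
def gapsFrom (l : List Bool) (c : Int) : List Int :=
  match l with
  | [] => []
  | false :: t => c :: gapsFrom t 0
  | true :: t => gapsFrom t (c + 1)

-- reference value of the whole function
def streaksRef (l : List Bool) : List Int :=
  match l with
  | [] => []
  | false :: t => gapsFrom t 0
  | true :: t => streaksRef t

-- the False indexes of l, counted from offset k
def fIdx (l : List Bool) (k : Nat) : List Int :=
  ((l.zipIdx k).filter (fun p => p.1 == false)).map (fun p => (p.2 : Int))

def gapsOf (xs : List Int) : List Int :=
  (xs.zip xs.tail).map (fun p => p.2 - p.1 - 1)

theorem fIdx_cons_false (t : List Bool) (k : Nat) :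
    fIdx (false :: t) k = (k : Int) :: fIdx t (k + 1) := by
  simp [fIdx, List.zipIdx]

theorem fIdx_cons_true (t : List Bool) (k : Nat) :
    fIdx (true :: t) k = fIdx t (k + 1) := by
  simp [fIdx, List.zipIdx]

theorem gapsOf_cons_fIdx (l : List Bool) :
    ∀ (k j : Nat), gapsOf ((j : Int) :: fIdx l k) = gapsFrom l ((k : Int) - j - 1) := by
  induction l with
  | nil => intro k j; simp [gapsOf, fIdx, gapsFrom]
  | cons x t ih =>
    intro k j
    cases x with
    | false =>
      rw [fIdx_cons_false]
      simp only [gapsFrom]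
      have h1 : gapsOf ((j : Int) :: (k : Int) :: fIdx t (k + 1)) =
          ((k : Int) - j - 1) :: gapsOf ((k : Int) :: fIdx t (k + 1)) := by
        simp [gapsOf]
      rw [h1, ih (k + 1) k]
      congr 1
      push_cast
      ring_nf
    | true =>
      rw [fIdx_cons_true]
      simp only [gapsFrom]
      rw [ih (k + 1) j]
      congr 1
      push_cast
      ring

theorem gapsOf_fIdx (l : List Bool) : ∀ (k : Nat), gapsOf (fIdx l k) = streaksRef l := by
  induction l with
  | nil => intro k; rfl
  | cons x t ih =>
    intro k
    cases x with
    | false =>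
      rw [fIdx_cons_false]
      simp only [streaksRef]
      rw [gapsOf_cons_fIdx t (k + 1) k]
      congr 1
      push_cast
      ring
    | true =>
      rw [fIdx_cons_true]
      simp only [streaksRef]
      exact ih (k + 1)

theorem a_eq_ref (l : List Bool) : find_streaks_in_rounds l = streaksRef l := by
  have : find_streaks_in_rounds l = gapsOf (fIdx l 0) := rfl
  rw [this, gapsOf_fIdx]

theorem foldl_bStep_seen (l : List Bool) :
    ∀ (c : Int) (acc : List Int),
      (l.foldl bStep (true, c, acc)).2.2 = acc ++ gapsFrom l c := by
  induction l with
  | nil => intro c acc; simp [gapsFrom]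
  | cons x t ih =>
    intro c acc
    cases x with
    | false => simp [bStep, gapsFrom, ih]
    | true => simp [bStep, gapsFrom, ih]

theorem foldl_bStep_unseen (l : List Bool) :
    ∀ (c : Int), (l.foldl bStep (false, c, [])).2.2 = streaksRef l := by
  induction l with
  | nil => intro c; rfl
  | cons x t ih =>
    intro c
    cases x with
    | false =>
      show (t.foldl bStep (bStep (false, c, []) false)).2.2 = _
      simp only [bStep, streaksRef, if_pos]
      simpa using foldl_bStep_seen t 0 []
    | true =>
      simp only [List.foldl, bStep]
      simpa [streaksRef] using ih (c + 1)

theorem b_eq_ref (l : List Bool) : find_streaks_in_rounds_alt l = streaksRef l := by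
  unfold find_streaks_in_rounds_alt
  exact foldl_bStep_unseen l 0

-- ===== VERDICT (by name: the statement is the Claim_ definition above) =====
theorem find_streaks_in_rounds_spec : Claim_equal_find_streaks_in_rounds := by
  intro l _
  unfold Spec_find_streaks_in_rounds
  rw [a_eq_ref, b_eq_ref]
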